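-- pv_equiv track=rewrite | github.com/StarSein/BaekJoon | 백준/Gold/1662. 압축/압축.py | solution
-- ===== SOURCE A (Python) =====
-- def solution(S: str) -> int:
--     stack = [[1, 0]]
--     for i, c in enumerate(S):
--         if c == '(':
--             stack.append([int(S[i - 1]), 0])
--         elif c == ')':
--             weight, length = stack.pop()
--             stack[-1][1] += weight * length
--         elif i + 1 == len(S) or S[i + 1] != '(':
--             stack[-1][1] += 1
--     ans = stack[0][1]
--     return ans
-- ===== SOURCE B (Python) =====
-- def solution(S: str) -> int:
--     # Recursive-descent parser: parse(i, acc) scans from index i, recursing into each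
--     # parenthesized group; returns (accumulated length, index just past the closing ')').
--     def parse(i, acc):
--         while i < len(S):
--             c = S[i]
--             if i + 1 < len(S) and S[i + 1] == '(':
--                 inner, i = parse(i + 2, 0)
--                 acc += int(c) * inner
--             elif c == ')':
--                 return acc, i + 1
--             else:
--                 acc += 1
--                 i += 1
--         return acc, i
--     return parse(0, 0)[0]
-- ===== Notes on version B (the rewrite author's own statement) =====
-- stated objective: alternative
-- what changed: Replaces A's explicit stack machine over enumerated indices (pushing [weight,length] pairs and multiplying on every pop) with a recursive-descent parser whose parse(i, acc) cursor recurses into each parenthesized group and adds weight*inner on return.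
-- outside the precondition, e.g. on solution('2(ab'): A returns 0, B returns 4; on solution('(a)2'): A returns 3, B returns 2
import Mathlib
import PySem

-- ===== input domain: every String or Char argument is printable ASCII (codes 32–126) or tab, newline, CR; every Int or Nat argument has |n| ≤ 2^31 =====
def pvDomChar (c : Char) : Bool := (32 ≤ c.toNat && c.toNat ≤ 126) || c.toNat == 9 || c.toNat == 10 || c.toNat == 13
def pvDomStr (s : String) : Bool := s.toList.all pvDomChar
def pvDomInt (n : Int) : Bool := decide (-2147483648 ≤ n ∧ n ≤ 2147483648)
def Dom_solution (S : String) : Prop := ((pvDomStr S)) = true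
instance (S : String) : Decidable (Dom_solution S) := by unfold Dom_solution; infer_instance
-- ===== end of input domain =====

-- B is an alternative implementation: a recursive-descent parser replacing A's explicit
-- stack machine over enumerated indices; same cost, different structure.

-- int(<one-character string>), with 0 where Python would raise ValueError (excluded by Pre_)
def pyIntChar (c : Char) : Int := (PySem.Int.ofStr? (String.mk [c])).getD 0

-- ===== PORT A =====
-- stack top = list head (Python stack[-1]); stack[0] = getLast
def stepA (cs : List Char) (st : List (Int × Int)) (ic : Int × Char) : List (Int × Int) :=
  if ic.2 = '(' then
    (pyIntChar ((PySem.List.pyGet? cs (ic.1 - 1)).getD ' '), 0) :: st  -- int(S[i-1]); non-digit = ValueError in Python, excluded by Pre_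
  else if ic.2 = ')' then
    match st with
    | (w, len) :: (w2, l2) :: rest => (w2, l2 + w * len) :: rest
    | _ => []  -- Python raises IndexError here (stack[-1] after popping the bottom); excluded by Pre_
  else if ic.1 + 1 = (cs.length : Int) ∨ PySem.List.pyGet? cs (ic.1 + 1) ≠ some '(' then
    match st with
    | (w, len) :: rest => (w, len + 1) :: rest
    | [] => []  -- unreachable: Python's stack is never empty here
  else st

def solution (S : String) : Int :=
  let cs := S.toList
  let stack := (PySem.List.enumerate cs 0).foldl (stepA cs) [(1, 0)]
  (stack.getLast?.getD (1, 0)).2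

-- ===== PORT B =====
-- parse(i, acc) of Source B: the while loop is the tail recursion, recursion into groups is
-- the nested call; returns (length, remaining input past the matching ')').  The length
-- bound on the remainder is carried in a subtype only to justify termination.
def parseB (cs : List Char) (acc : Int) : Int × { r : List Char // r.length ≤ cs.length } :=
  match cs with
  | [] => (acc, ⟨[], by simp⟩)
  | c :: rest =>
    if rest.head? = some '(' then
      match parseB rest.tail 0 with
      | (inner, ⟨r1, h1⟩) =>
        match parseB r1 (acc + pyIntChar c * inner) with
        | (t, ⟨r2, h2⟩) =>
          (t, ⟨r2, by simp only [List.length_cons, List.length_tail] at *; omega⟩)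
    else if c = ')' then (acc, ⟨rest, by simp⟩)
    else
      match parseB rest (acc + 1) with
      | (t, ⟨r2, h2⟩) => (t, ⟨r2, by simp only [List.length_cons] at *; omega⟩)
termination_by cs.length
decreasing_by
  · simp only [List.length_cons, List.length_tail]; omega
  · simp only [List.length_cons, List.length_tail] at *; omega
  · simp only [List.length_cons]; omega

def solution_alt (S : String) : Int := (parseB S.toList 0).1

-- ===== PRECONDITION & SPEC =====
-- every '(' must be immediately preceded by a digit (else Python's int raises ValueError,
-- or for a leading '(' reads S[-1] by wraparound)
def pairsOK : List Char → Bool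
  | c :: d :: rest => (if d = '(' then c.isDigit else true) && pairsOK (d :: rest)
  | _ => true

-- parentheses balanced (depth counter never dips below 0, ends at 0): a stray ')' raises
-- IndexError in A, and unclosed '(' leaves content A silently drops
def balOK : List Char → Nat → Bool
  | [], k => k == 0
  | c :: rest, k =>
    if c = '(' then balOK rest (k + 1)
    else if c = ')' then (k != 0) && balOK rest (k - 1)
    else balOK rest k

-- Pre_ = the natural domain: well-formed compressed strings (no leading '(', every '('
-- preceded by a digit, parentheses balanced).  It also excludes malformed inputs on which
-- A still returns a value only by accident (unclosed '(' whose content A drops; a leading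
-- '(' taking its weight from the LAST character by negative-index wraparound).
def Pre_solution (S : String) : Prop :=
  S.toList.head? ≠ some '(' ∧ pairsOK S.toList = true ∧ balOK S.toList 0 = true

instance (S : String) : Decidable (Pre_solution S) := by unfold Pre_solution; infer_instance

def pvWitness_solution : String := "2(a3(xy)b)c"

def Spec_solution (S : String) (out : Int) : Prop := out = solution_alt S
instance (S : String) (out : Int) : Decidable (Spec_solution S out) := by unfold Spec_solution; infer_instance

-- ===== CLAIM (what is proved, stated in full; the proofs are below) =====
def Claim_equal_solution : Prop := ∀ (S : String), Dom_solution S → Pre_solution S → Spec_solution S (solution S)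

-- ===== LEMMAS AND PROOFS =====

-- A's fold, rewritten as a local recursion carrying the previous character
def runA : List Char → Option Char → List (Int × Int) → List (Int × Int)
  | [], _, st => st
  | c :: rest, prev, st =>
    runA rest (some c)
      (if c = '(' then ((prev.map pyIntChar).getD 0, 0) :: st
       else if c = ')' then
         match st with
         | (w, len) :: (w2, l2) :: r => (w2, l2 + w * len) :: r
         | _ => []
       else if rest.head? ≠ some '(' then
         match st with
         | (w, len) :: r => (w, len + 1) :: r
         | [] => []
       else st)

-- B's parser, defunctionalized to a machine with a frame stack (weight, saved acc)
def runM : List Char → Int → List (Int × Int) → Int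
  | [], acc, fr => fr.foldl (fun a p => p.2 + p.1 * a) acc
  | c :: rest, acc, fr =>
    if rest.head? = some '(' then runM rest.tail 0 ((pyIntChar c, acc) :: fr)
    else if c = ')' then
      match fr with
      | (w, s) :: fr' => runM rest (s + w * acc) fr'
      | [] => acc
    else runM rest (acc + 1) fr
termination_by l => l.length
decreasing_by
  · have := (by simp [List.length_tail] : rest.tail.length ≤ rest.length); simp only [List.length_cons]; omega
  · simp only [List.length_cons]; omega
  · simp only [List.length_cons]; omega

-- the A-stack encoded by the machine state: acc = top length, frames give the rest
def buildStack : Int → List (Int × Int) → List (Int × Int)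
  | acc, [] => [(1, acc)]
  | acc, (w, s) :: fr => (w, acc) :: buildStack s fr

def lastLen (st : List (Int × Int)) : Int := (st.getLast?.getD (1, 0)).2

-- small facts about the shape conditions
theorem pairsOK_tail (c : Char) (rest : List Char) (h : pairsOK (c :: rest) = true) :
    pairsOK rest = true := by
  cases rest with
  | nil => simp [pairsOK]
  | cons d rs => simp [pairsOK] at h; exact h.2

theorem pairsOK_group (c : Char) (rest2 : List Char) (h : pairsOK (c :: '(' :: rest2) = true) :
    c.isDigit = true ∧ rest2.head? ≠ some '(' ∧ pairsOK rest2 = true := by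
  cases rest2 with
  | nil => simp [pairsOK] at h ⊢; exact h
  | cons r0 rs =>
    simp [pairsOK] at h
    refine ⟨h.1, ?_, h.2.2⟩
    intro hr0
    simp at hr0
    rw [hr0] at h
    simp at h

-- parseB unfolding equations (stated componentwise to avoid the subtype)
theorem parseB_nil (acc : Int) : (parseB [] acc).1 = acc ∧ (parseB [] acc).2.1 = [] := by
  rw [parseB.eq_def]
  exact ⟨rfl, rfl⟩

theorem parseB_cons_group (c : Char) (rest : List Char) (acc : Int) (h : rest.head? = some '(') :
    (parseB (c :: rest) acc).1
        = (parseB (parseB rest.tail 0).2.1 (acc + pyIntChar c * (parseB rest.tail 0).1)).1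
    ∧ (parseB (c :: rest) acc).2.1
        = (parseB (parseB rest.tail 0).2.1 (acc + pyIntChar c * (parseB rest.tail 0).1)).2.1 := by
  rcases hp : parseB rest.tail 0 with ⟨inner, r1, h1⟩
  rcases hq : parseB r1 (acc + pyIntChar c * inner) with ⟨t, r2, h2⟩
  rw [parseB.eq_def]
  simp only [h, if_pos, hp]
  rw [hp]
  simp [hq]

theorem parseB_cons_close (rest : List Char) (acc : Int) (h : rest.head? ≠ some '(') :
    (parseB (')' :: rest) acc).1 = acc ∧ (parseB (')' :: rest) acc).2.1 = rest := by
  rw [parseB.eq_def]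
  simp [h]

theorem parseB_cons_other (c : Char) (rest : List Char) (acc : Int)
    (h : rest.head? ≠ some '(') (hc : c ≠ ')') :
    (parseB (c :: rest) acc).1 = (parseB rest (acc + 1)).1
    ∧ (parseB (c :: rest) acc).2.1 = (parseB rest (acc + 1)).2.1 := by
  rcases hq : parseB rest (acc + 1) with ⟨t, r2, h2⟩
  rw [parseB.eq_def]
  simp [h, hc, hq]

-- runM unfolding equations
theorem runM_nil (acc : Int) (fr : List (Int × Int)) :
    runM [] acc fr = fr.foldl (fun a p => p.2 + p.1 * a) acc := by
  rw [runM.eq_def]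

theorem runM_cons_group (c : Char) (rest : List Char) (acc : Int) (fr : List (Int × Int))
    (h : rest.head? = some '(') :
    runM (c :: rest) acc fr = runM rest.tail 0 ((pyIntChar c, acc) :: fr) := by
  rw [runM.eq_def]; simp [h]

theorem runM_cons_close_cons (rest : List Char) (acc w s : Int) (fr' : List (Int × Int))
    (h : rest.head? ≠ some '(') :
    runM (')' :: rest) acc ((w, s) :: fr') = runM rest (s + w * acc) fr' := by
  rw [runM.eq_def]; simp [h]

theorem runM_cons_close_nil (rest : List Char) (acc : Int)
    (h : rest.head? ≠ some '(') :
    runM (')' :: rest) acc [] = acc := by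
  rw [runM.eq_def]; simp [h]

theorem runM_cons_other (c : Char) (rest : List Char) (acc : Int) (fr : List (Int × Int))
    (h : rest.head? ≠ some '(') (hc : c ≠ ')') :
    runM (c :: rest) acc fr = runM rest (acc + 1) fr := by
  rw [runM.eq_def]; simp [h, hc]

-- B's parser agrees with its defunctionalized machine
theorem runM_parseB (n : Nat) : ∀ (l : List Char), l.length ≤ n → ∀ (acc : Int),
    (∀ (w s : Int) (fr : List (Int × Int)),
        runM l acc ((w, s) :: fr) = runM (parseB l acc).2.1 (s + w * (parseB l acc).1) fr)
    ∧ runM l acc [] = (parseB l acc).1 := by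
  induction n with
  | zero =>
    intro l hl acc
    match l, hl with
    | [], _ =>
    refine ⟨fun w s fr => ?_, ?_⟩
    · rw [runM_nil, (parseB_nil acc).1, (parseB_nil acc).2, runM_nil]
      simp
    · rw [runM_nil, (parseB_nil acc).1]
      simp
  | succ m ih =>
    intro l hl acc
    match l with
    | [] =>
      refine ⟨fun w s fr => ?_, ?_⟩
      · rw [runM_nil, (parseB_nil acc).1, (parseB_nil acc).2, runM_nil]
        simp
      · rw [runM_nil, (parseB_nil acc).1]
        simp
    | c :: rest =>
      by_cases hr : rest.head? = some '('
      · have hlt : rest.tail.length ≤ m := by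
          cases rest with
          | nil => simp at hr
          | cons r0 rs => simp at hl ⊢; omega
        obtain ⟨IH1t, IH2t⟩ := ih rest.tail hlt 0
        have hp1 : (parseB rest.tail 0).2.1.length ≤ m := le_trans (parseB rest.tail 0).2.2 hlt
        obtain ⟨IH1p, IH2p⟩ :=
          ih (parseB rest.tail 0).2.1 hp1 (acc + pyIntChar c * (parseB rest.tail 0).1)
        refine ⟨fun w s fr => ?_, ?_⟩
        · rw [runM_cons_group c rest acc ((w, s) :: fr) hr, IH1t, IH1p,
              (parseB_cons_group c rest acc hr).1, (parseB_cons_group c rest acc hr).2]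
        · rw [runM_cons_group c rest acc [] hr, IH1t, IH2p,
              (parseB_cons_group c rest acc hr).1]
      · by_cases hc : c = ')'
        · subst hc
          refine ⟨fun w s fr => ?_, ?_⟩
          · rw [runM_cons_close_cons rest acc w s fr hr,
                (parseB_cons_close rest acc hr).1, (parseB_cons_close rest acc hr).2]
          · rw [runM_cons_close_nil rest acc hr, (parseB_cons_close rest acc hr).1]
        · have hlt : rest.length ≤ m := by simp at hl; omega
          obtain ⟨IH1, IH2⟩ := ih rest hlt (acc + 1)
          refine ⟨fun w s fr => ?_, ?_⟩
          · rw [runM_cons_other c rest acc ((w, s) :: fr) hr hc, IH1,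
                (parseB_cons_other c rest acc hr hc).1, (parseB_cons_other c rest acc hr hc).2]
          · rw [runM_cons_other c rest acc [] hr hc, IH2,
                (parseB_cons_other c rest acc hr hc).1]

-- the bump branch commutes with the stack encoding
theorem buildStack_bump (fr : List (Int × Int)) (acc : Int) :
    (match buildStack acc fr with
     | (w, len) :: r => (w, len + 1) :: r
     | [] => []) = buildStack (acc + 1) fr := by
  cases fr with
  | nil => simp [buildStack]
  | cons p fr' => cases p; simp [buildStack]

-- the pop branch commutes with the stack encoding
theorem buildStack_pop (fr' : List (Int × Int)) (acc w s : Int) :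
    (match buildStack acc ((w, s) :: fr') with
     | (w1, l1) :: (w2, l2) :: r => (w2, l2 + w1 * l1) :: r
     | _ => []) = buildStack (s + w * acc) fr' := by
  cases fr' with
  | nil => simp [buildStack]
  | cons p f2 => cases p; simp [buildStack]

theorem stepA_eq (cs : List Char) (st : List (Int × Int)) (i : Int) (c : Char) :
    stepA cs st (i, c) =
      if c = '(' then
        (pyIntChar ((PySem.List.pyGet? cs (i - 1)).getD ' '), 0) :: st
      else if c = ')' then
        match st with
        | (w, len) :: (w2, l2) :: rest => (w2, l2 + w * len) :: rest
        | _ => []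
      else if i + 1 = (cs.length : Int) ∨ PySem.List.pyGet? cs (i + 1) ≠ some '(' then
        match st with
        | (w, len) :: rest => (w, len + 1) :: rest
        | [] => []
      else st := rfl

theorem runA_cons (c : Char) (rest : List Char) (prev : Option Char) (st : List (Int × Int)) :
    runA (c :: rest) prev st = runA rest (some c)
      (if c = '(' then ((prev.map pyIntChar).getD 0, 0) :: st
       else if c = ')' then
         match st with
         | (w, len) :: (w2, l2) :: r => (w2, l2 + w * len) :: r
         | _ => []
       else if rest.head? ≠ some '(' then
         match st with
         | (w, len) :: r => (w, len + 1) :: r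
         | [] => []
       else st) := rfl

-- A's local recursion agrees with B's machine on well-shaped input
theorem runA_runM (n : Nat) : ∀ (l : List Char), l.length ≤ n →
    ∀ (prev : Option Char) (acc : Int) (fr : List (Int × Int)),
    l.head? ≠ some '(' → pairsOK l = true → balOK l fr.length = true →
    lastLen (runA l prev (buildStack acc fr)) = runM l acc fr := by
  induction n with
  | zero =>
    intro l hl prev acc fr h1 h2 h3
    match l, hl with
    | [], _ =>
      simp [balOK] at h3
      match fr, h3 with
      | [], _ =>
        rw [runM_nil]
        simp [runA, buildStack, lastLen]
  | succ m ih =>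
    intro l hl prev acc fr h1 h2 h3
    match l with
    | [] =>
      simp [balOK] at h3
      match fr, h3 with
      | [], _ =>
        rw [runM_nil]
        simp [runA, buildStack, lastLen]
    | c :: rest =>
      have hc1 : c ≠ '(' := by simpa using h1
      by_cases hr : rest.head? = some '('
      · -- group entry: two characters c, '(' are consumed
        match rest with
        | r0 :: rs =>
        have hr0 : r0 = '(' := by simpa using hr
        subst hr0
        obtain ⟨hdig, hh2, hp2⟩ := pairsOK_group c rs h2
        have hcne : c ≠ ')' := by
          intro e; rw [e] at hdig; exact absurd hdig (by decide)
        have h3' : balOK rs (fr.length + 1) = true := by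
          simpa [balOK, hc1, hcne] using h3
        have hlen : rs.length ≤ m := by simp at hl; omega
        have step : runA (c :: '(' :: rs) prev (buildStack acc fr)
            = runA rs (some '(') (buildStack 0 ((pyIntChar c, acc) :: fr)) := by
          rw [runA_cons, runA_cons]
          simp [hc1, hcne, buildStack]
        rw [step, runM_cons_group c ('(' :: rs) acc fr hr]
        exact ih rs hlen (some '(') 0 ((pyIntChar c, acc) :: fr) hh2 hp2 h3'
      · by_cases hc : c = ')'
        · subst hc
          match fr with
          | [] =>
            exfalso
            simp [balOK] at h3
          | (w, s) :: fr' =>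
            have h3' : balOK rest fr'.length = true := by
              have := h3
              simp [balOK] at this
              simpa using this
            have hp' : pairsOK rest = true := pairsOK_tail _ _ h2
            have hlen : rest.length ≤ m := by simp at hl; omega
            have step : runA (')' :: rest) prev (buildStack acc ((w, s) :: fr'))
                = runA rest (some ')') (buildStack (s + w * acc) fr') := by
              rw [runA_cons]
              rw [← buildStack_pop fr' acc w s]
              simp [buildStack]
            rw [step, runM_cons_close_cons rest acc w s fr' hr]
            exact ih rest hlen (some ')') (s + w * acc) fr' hr hp' h3'
        · have h3' : balOK rest fr.length = true := by
            simpa [balOK, hc1, hc] using h3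
          have hp' : pairsOK rest = true := pairsOK_tail _ _ h2
          have hlen : rest.length ≤ m := by simp at hl; omega
          have step : runA (c :: rest) prev (buildStack acc fr)
              = runA rest (some c) (buildStack (acc + 1) fr) := by
            rw [runA_cons, ← buildStack_bump fr acc]
            simp [hc1, hc, hr]
          rw [step, runM_cons_other c rest acc fr hr hc]
          exact ih rest hlen (some c) (acc + 1) fr hr hp' h3' 

-- A's indexed fold agrees with its local recursion
theorem foldA_runA : ∀ (suf pre : List Char) (st : List (Int × Int)),
    (pre ++ suf).head? ≠ some '(' →
    (PySem.List.enumerate suf (pre.length : Int)).foldl (stepA (pre ++ suf)) st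
      = runA suf pre.getLast? st := by
  intro suf
  induction suf with
  | nil => intro pre st h; simp [PySem.List.enumerate_nil, runA]
  | cons c rest ih =>
    intro pre st h
    rw [PySem.List.enumerate_cons, List.foldl_cons, runA_cons]
    have hlen : ((pre ++ [c]).length : Int) = (pre.length : Int) + 1 := by
      simp only [List.length_append, List.length_cons, List.length_nil]
      push_cast; ring
    have ih' := ih (pre ++ [c]) (stepA (pre ++ c :: rest) st ((pre.length : Int), c))
      (by rw [List.append_assoc, List.singleton_append]; exact h)
    rw [List.append_assoc, List.singleton_append, hlen, List.getLast?_concat] at ih'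
    rw [ih']
    congr 1
    by_cases hc : c = '('
    · subst hc
      rcases List.eq_nil_or_concat pre with rfl | ⟨q, d, rfl⟩
      · exact absurd (by simp : (([] : List Char) ++ '(' :: rest).head? = some '(') h
      · simp [stepA]
    · by_cases hc2 : c = ')'
      · subst hc2
        simp [stepA]
      · -- ordinary character: the bump conditions of the two sides coincide
        cases rest with
        | nil =>
          have hyc : ((pre.length : Int) + 1 = ((pre ++ [c]).length : Int)) := hlen.symm
          rw [stepA_eq, if_neg hc, if_neg hc2, if_pos (Or.inl hyc), if_neg hc, if_neg hc2,
              if_pos (by simp : (([] : List Char).head? ≠ some '('))]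
        | cons r0 rs =>
          have e1 : pre ++ c :: r0 :: rs = (pre ++ [c]) ++ (r0 :: rs) := by simp
          have hget : PySem.List.pyGet? (pre ++ c :: r0 :: rs) ((pre.length : Int) + 1)
              = some r0 := by
            rw [e1, ← hlen]
            exact PySem.List.pyGet?_append_length ..
          have hlen2 : ¬((pre.length : Int) + 1 = ((pre ++ c :: r0 :: rs).length : Int)) := by
            simp only [List.length_append, List.length_cons]
            push_cast
            omega
          by_cases hb : r0 = '('
          · subst hb
            have hnc : ¬((pre.length : Int) + 1 = ((pre ++ c :: '(' :: rs).length : Int)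
                ∨ PySem.List.pyGet? (pre ++ c :: '(' :: rs) ((pre.length : Int) + 1)
                    ≠ some '(') := by
              rintro (ha | hne)
              · exact hlen2 ha
              · exact hne hget
            rw [stepA_eq, if_neg hc, if_neg hc2, if_neg hnc, if_neg hc, if_neg hc2,
                if_neg (by simp : ¬(('(' :: rs).head? ≠ some '('))]
          · have hyc : ((pre.length : Int) + 1 = ((pre ++ c :: r0 :: rs).length : Int)
                ∨ PySem.List.pyGet? (pre ++ c :: r0 :: rs) ((pre.length : Int) + 1)
                    ≠ some '(') := by
              right
              rw [hget]
              simpa using hb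
            rw [stepA_eq, if_neg hc, if_neg hc2, if_pos hyc, if_neg hc, if_neg hc2,
                if_pos (by simpa using hb : ((r0 :: rs).head? ≠ some '('))]

-- ===== VERDICT (by name: the statement is the Claim_ definition above) =====
theorem solution_spec : Claim_equal_solution := by
  intro S _ hPre
  obtain ⟨h1, h2, h3⟩ := hPre
  unfold Spec_solution
  have hE := foldA_runA S.toList [] [(1, 0)] (by simpa using h1)
  simp only [List.nil_append, List.length_nil, Nat.cast_zero, List.getLast?_nil] at hE
  have hC := runA_runM S.toList.length S.toList le_rfl none 0 [] h1 h2 h3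
  have hB := (runM_parseB S.toList.length S.toList le_rfl 0).2
  unfold solution solution_alt
  simp only []
  rw [hE]
  have : buildStack 0 [] = [(1, 0)] := rfl
  rw [← this] at *
  rw [show runA S.toList none (buildStack 0 []) = runA S.toList none (buildStack 0 []) from rfl]
  calc ((runA S.toList none (buildStack 0 [])).getLast?.getD (1, 0)).2
      = lastLen (runA S.toList none (buildStack 0 [])) := rfl
    _ = runM S.toList 0 [] := hC
    _ = (parseB S.toList 0).1 := hB
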